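-- pv_equiv track=rewrite | github.com/to-boss/ifc2mc | ifc2mc/importer.py | _infer_material_bucket
-- ===== SOURCE A (Python) =====
-- from collections import Counter
--
-- _MATERIAL_BUCKET_KEYWORDS: tuple[tuple[str, tuple[str, ...]], ...] = (
--     (
--         "wood",
--         (
--             "wood",
--             "timber",
--             "lumber",
--             "hout",
--             "hardhout",
--             "multiplex",
--             "plywood",
--             "oak",
--             "pine",
--             "spruce",
--         ),
--     ),
--     (
--         "metal",
--         (
--             "steel",
--             "staal",
--             "metal",
--             "aluminium",
--             "aluminum",
--             "copper",
--             "zinc",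
--             "iron",
--             "bronze",
--         ),
--     ),
--     ("concrete", ("concrete", "beton", "cement")),
--     (
--         "masonry",
--         ("masonry", "brick", "baksteen", "stone", "granite", "natuursteen", "kalkzandsteen"),
--     ),
--     ("glass", ("glass", "glas", "glazing")),
--     (
--         "soil",
--         (
--             "soil",
--             "earth",
--             "dirt",
--             "gravel",
--             "sand",
--             "asphalt",
--             "bulk-material",
--             "fill",
--         ),
--     ),
-- )
--
-- _MATERIAL_BUCKET_ORDER = {
--     bucket: index for index, (bucket, _) in enumerate(_MATERIAL_BUCKET_KEYWORDS)
-- }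
--
-- def _infer_material_bucket(material_names: tuple[str, ...]) -> str | None:
--     if not material_names:
--         return None
--
--     bucket_scores: Counter[str] = Counter()
--     for material_name in material_names:
--         name_lc = material_name.lower()
--         for bucket, keywords in _MATERIAL_BUCKET_KEYWORDS:
--             if any(keyword in name_lc for keyword in keywords):
--                 bucket_scores[bucket] += 1
--
--     if not bucket_scores:
--         return None
--
--     return max(
--         bucket_scores.items(),
--         key=lambda item: (item[1], -_MATERIAL_BUCKET_ORDER[item[0]]),
--     )[0]
-- ===== SOURCE B (Python) =====
-- _MATERIAL_BUCKET_KEYWORDS: tuple[tuple[str, tuple[str, ...]], ...] = (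
--     (
--         "wood",
--         ("wood", "timber", "lumber", "hout", "hardhout", "multiplex", "plywood", "oak", "pine", "spruce"),
--     ),
--     (
--         "metal",
--         ("steel", "staal", "metal", "aluminium", "aluminum", "copper", "zinc", "iron", "bronze"),
--     ),
--     ("concrete", ("concrete", "beton", "cement")),
--     (
--         "masonry",
--         ("masonry", "brick", "baksteen", "stone", "granite", "natuursteen", "kalkzandsteen"),
--     ),
--     ("glass", ("glass", "glas", "glazing")),
--     (
--         "soil",
--         ("soil", "earth", "dirt", "gravel", "sand", "asphalt", "bulk-material", "fill"),
--     ),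
-- )
--
--
-- def _infer_material_bucket(material_names: tuple[str, ...]) -> str | None:
--     if not material_names:
--         return None
--
--     # Sort-then-scan mode finding: record one bucket INDEX per (name, matching
--     # bucket) pair, sort the indices, and take the longest run in one scan.
--     # Scanning in ascending index order with a strict '>' makes the earliest
--     # declared bucket win ties, which is exactly the intended tie-break.
--     hits: list[int] = []
--     for name in material_names:
--         low = name.lower()
--         for idx, (_bucket, keywords) in enumerate(_MATERIAL_BUCKET_KEYWORDS):
--             if any(keyword in low for keyword in keywords):
--                 hits.append(idx)
--
--     best_idx = None
--     best_run = 0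
--     cur_idx = None
--     cur_run = 0
--     for idx in sorted(hits):
--         if idx == cur_idx:
--             cur_run += 1
--         else:
--             cur_idx = idx
--             cur_run = 1
--         if cur_run > best_run:
--             best_run = cur_run
--             best_idx = idx
--
--     if best_idx is None:
--         return None
--     return _MATERIAL_BUCKET_KEYWORDS[best_idx][0]
-- ===== Notes on version B (the rewrite author's own statement) =====
-- stated objective: alternative
-- what changed: Replaced the Counter-per-bucket plus keyed max (score, -bucket_order) by a sort-then-scan mode computation: emit one bucket index per (name, matching bucket) pair, sort the indices, and take the longest run in a single scan, where ascending order with a strict '>' reproduces the earliest-bucket tie-break without the Counter, the order dict or the keyed max.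
import Mathlib
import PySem

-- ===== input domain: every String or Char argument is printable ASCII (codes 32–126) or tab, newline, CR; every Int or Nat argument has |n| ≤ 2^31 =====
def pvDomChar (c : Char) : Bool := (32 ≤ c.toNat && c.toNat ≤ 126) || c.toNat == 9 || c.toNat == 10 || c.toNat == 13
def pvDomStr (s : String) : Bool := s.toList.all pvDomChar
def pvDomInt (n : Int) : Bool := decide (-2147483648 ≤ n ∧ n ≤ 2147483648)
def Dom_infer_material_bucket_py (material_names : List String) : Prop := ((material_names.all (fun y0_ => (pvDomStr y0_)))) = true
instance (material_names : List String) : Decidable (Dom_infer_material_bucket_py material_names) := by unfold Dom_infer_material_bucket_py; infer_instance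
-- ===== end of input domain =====

-- B replaces A's Counter + keyed max (score, -bucket_order) by a sort-then-scan mode computation:
-- one bucket index per (name, matching bucket) pair, sorted, longest run in one scan (objective: alternative).

-- ===== PORT A =====
-- module constant _MATERIAL_BUCKET_KEYWORDS
def pvBuckets : List (String × List String) :=
  [ ("wood", ["wood", "timber", "lumber", "hout", "hardhout", "multiplex", "plywood", "oak", "pine", "spruce"]),
    ("metal", ["steel", "staal", "metal", "aluminium", "aluminum", "copper", "zinc", "iron", "bronze"]),
    ("concrete", ["concrete", "beton", "cement"]),
    ("masonry", ["masonry", "brick", "baksteen", "stone", "granite", "natuursteen", "kalkzandsteen"]),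
    ("glass", ["glass", "glas", "glazing"]),
    ("soil", ["soil", "earth", "dirt", "gravel", "sand", "asphalt", "bulk-material", "fill"]) ]

-- module constant _MATERIAL_BUCKET_ORDER = {bucket: index for index, (bucket, _) in enumerate(...)}
def pvOrderDict : PySem.Dict String Int :=
  (PySem.List.enumerate pvBuckets).foldl (fun d p => d.insert p.2.1 (p.1 : Int)) PySem.Dict.empty

-- _MATERIAL_BUCKET_ORDER[b]; every lookup performed by A uses a key of the scores Counter,
-- which is always a bucket name, so the KeyError branch (get? = none) is unreachable.
def pvOrderOf (b : String) : Int := (pvOrderDict.get? b).getD 0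

-- any(keyword in name_lc for keyword in keywords)  (same module-level expression in A and B)
def pvHit (name_lc : String) (bk : String × List String) : Bool :=
  bk.2.any (fun keyword => PySem.Str.isIn keyword name_lc)

def infer_material_bucket_py (material_names : List String) : Option String :=
  if material_names = [] then none
  else
    let bucket_scores : PySem.Dict String Int :=
      material_names.foldl
        (fun d material_name =>
          let name_lc := PySem.Str.lower material_name
          pvBuckets.foldl
            (fun d bk => if pvHit name_lc bk then d.modify bk.1 0 (· + 1) else d) d)
        PySem.Dict.empty
    if bucket_scores.items = [] then none
    else
      (PySem.List.max2? bucket_scores.items (fun it => it.2) (fun it => -(pvOrderOf it.1))).map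
        (fun it => it.1)

-- ===== PORT B =====
-- loop body of B's single scan over the sorted hit indices (state: best_idx, best_run, cur_idx, cur_run)
def pvRunStep (st : Option Int × Int × Option Int × Int) (idx : Int) : Option Int × Int × Option Int × Int :=
  let (best_idx, best_run, cur_idx, cur_run) := st
  let cur2 : Option Int × Int :=
    if cur_idx = some idx then (cur_idx, cur_run + 1) else (some idx, 1)
  if cur2.2 > best_run then (some idx, cur2.2, cur2.1, cur2.2)
  else (best_idx, best_run, cur2.1, cur2.2)

def infer_material_bucket_py_alt (material_names : List String) : Option String :=
  if material_names = [] then none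
  else
    let hits : List Int :=
      material_names.foldl
        (fun hits name =>
          let low := PySem.Str.lower name
          (PySem.List.enumerate pvBuckets).foldl
            (fun hits p => if pvHit low p.2 then hits ++ [p.1] else hits) hits)
        []
    let st := (PySem.List.sorted hits (fun x => x) false).foldl pvRunStep (none, 0, none, 0)
    match st.1 with
    | none => none
    | some best_idx =>
      -- _MATERIAL_BUCKET_KEYWORDS[best_idx][0]; best_idx came from enumerate, so it is
      -- always a valid index and the IndexError branch (pyGet? = none) is unreachable.
      match PySem.List.pyGet? pvBuckets best_idx with
      | some bk => some bk.1
      | none => none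

-- ===== PRECONDITION & SPEC =====
def Spec_infer_material_bucket_py (material_names : List String) (out : Option String) : Prop := out = infer_material_bucket_py_alt material_names
instance (material_names : List String) (out : Option String) : Decidable (Spec_infer_material_bucket_py material_names out) := by unfold Spec_infer_material_bucket_py; infer_instance

-- ===== CLAIM (what is proved, stated in full; the proofs are below) =====
def Claim_equal_infer_material_bucket_py : Prop := ∀ (material_names : List String), Dom_infer_material_bucket_py material_names → Spec_infer_material_bucket_py material_names (infer_material_bucket_py material_names)

-- ===== LEMMAS AND PROOFS =====

-- bucket score of bk (as a Nat): how many names contain one of bk's keywords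
def pvScN (names : List String) (bk : String × List String) : Nat :=
  (names.filter (fun name => pvHit (PySem.Str.lower name) bk)).length

-- the multiset of bucket names hit, one entry per (name, hit bucket) pair, in A's loop order
def pvL (names : List String) : List String :=
  names.flatMap (fun n => (pvBuckets.filter (pvHit (PySem.Str.lower n))).map Prod.fst)

-- the common reference point: the earliest bucket with the strictly largest score
def pvBest (names : List String) : Option String :=
  (pvBuckets.foldl
      (fun (acc : Option String × Int) bk =>
        if acc.2 < (pvScN names bk : Int) then (some bk.1, (pvScN names bk : Int)) else acc)
      (none, 0)).1

lemma pvBuckets_fst_nodup : (pvBuckets.map Prod.fst).Nodup := by decide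

lemma pvBuckets_ord_pairwise : pvBuckets.Pairwise (fun x y => pvOrderOf x.1 < pvOrderOf y.1) := by
  decide

-- A's scores dict IS the Counter of pvL
lemma pv_scores_eq (names : List String) :
    names.foldl
        (fun d material_name =>
          let name_lc := PySem.Str.lower material_name
          pvBuckets.foldl
            (fun d bk => if pvHit name_lc bk then d.modify bk.1 0 (· + 1) else d) d)
        PySem.Dict.empty
      = PySem.Dict.counter (pvL names) := by
  rw [PySem.Dict.counter_eq_foldl, pvL, List.foldl_flatMap]
  congr 1
  funext d n
  rw [PySem.List.foldl_if_eq_foldl_filter, List.foldl_map]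

lemma pv_count_map_fst_filter {α β : Type} [DecidableEq α] (p : α × β → Bool) :
    ∀ (l : List (α × β)) (bk : α × β), bk ∈ l → (l.map Prod.fst).Nodup →
      ((l.filter p).map Prod.fst).count bk.1 = if p bk then 1 else 0 := by
  intro l
  induction l with
  | nil => intro bk h; simp at h
  | cons x t ih =>
    intro bk hmem hnd
    rw [List.map_cons] at hnd
    have hx1 : x.1 ∉ t.map Prod.fst := (List.nodup_cons.mp hnd).1
    have hndt : (t.map Prod.fst).Nodup := (List.nodup_cons.mp hnd).2
    rcases List.mem_cons.mp hmem with heq | hmt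
    · subst heq
      have hzero : ((t.filter p).map Prod.fst).count bk.1 = 0 := by
        rw [List.count_eq_zero]
        intro hc
        rcases List.mem_map.mp hc with ⟨q, hq, hq1⟩
        exact hx1 (List.mem_map.mpr ⟨q, List.mem_of_mem_filter hq, hq1⟩)
      by_cases hp : p bk = true
      · simp [hp, hzero]
      · simp [hp, hzero]
    · have hne : x.1 ≠ bk.1 := by
        intro h; exact hx1 (h ▸ List.mem_map.mpr ⟨bk, hmt, rfl⟩)
      have hih := ih bk hmt hndt
      by_cases hp : p x = true
      · rw [List.filter_cons_of_pos hp, List.map_cons, List.count_cons_of_ne hne, hih]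
      · simp [hp, hih]

lemma pv_count_L (bk : String × List String) (hbk : bk ∈ pvBuckets) (names : List String) :
    (pvL names).count bk.1 = pvScN names bk := by
  induction names with
  | nil => rfl
  | cons n ns ih =>
    have hstep := pv_count_map_fst_filter (pvHit (PySem.Str.lower n)) pvBuckets bk hbk
      pvBuckets_fst_nodup
    by_cases hp : pvHit (PySem.Str.lower n) bk = true
    · simp only [pvL, List.flatMap_cons, List.count_append] at *
      rw [hstep, if_pos hp, ih]
      simp [pvScN, hp, Nat.add_comm]
    · simp only [pvL, List.flatMap_cons, List.count_append] at *
      rw [hstep, if_neg hp, ih]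
      simp [pvScN, hp]

lemma pv_mem_L {b : String} {names : List String} (h : b ∈ pvL names) :
    ∃ bk ∈ pvBuckets, bk.1 = b := by
  rcases List.mem_flatMap.mp h with ⟨n, _, hb⟩
  rcases List.mem_map.mp hb with ⟨bk, hbk, hfst⟩
  exact ⟨bk, List.mem_of_mem_filter hbk, hfst⟩

-- Python's strict lexicographic tuple order on the key (k1, k2)
def pvLt {α : Type} (k1 k2 : α → Int) (y m : α) : Prop :=
  k1 y < k1 m ∨ (k1 y = k1 m ∧ k2 y < k2 m)

lemma pv_max2_go {α : Type} (k1 k2 : α → Int) (m : α) :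
    ∀ (t : List α) (a : α),
      (a = m ∨ (pvLt k1 k2 a m ∧ m ∈ t)) →
      (∀ y ∈ t, y = m ∨ pvLt k1 k2 y m) →
      List.foldl
          (fun acc x =>
            match acc with
            | none => some x
            | some w =>
              if (decide (k1 w < k1 x) || !decide (k1 x < k1 w) && decide (k2 w < k2 x)) = true
              then some x else some w)
          (some a) t = some m := by
  intro t
  induction t with
  | nil =>
    intro a ha _
    rcases ha with rfl | ⟨_, hm⟩
    · rfl
    · simp at hm
  | cons x t' ih =>
    intro a ha hall
    rw [List.foldl_cons]
    have hred : (match some a with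
            | none => some x
            | some w =>
              if (decide (k1 w < k1 x) || !decide (k1 x < k1 w) && decide (k2 w < k2 x)) = true
              then some x else some w : Option α)
        = if (decide (k1 a < k1 x) || !decide (k1 x < k1 a) && decide (k2 a < k2 x)) = true
          then some x else some a := rfl
    rw [hred]
    have hall' : ∀ y ∈ t', y = m ∨ pvLt k1 k2 y m := fun y hy => hall y (List.mem_cons_of_mem _ hy)
    by_cases hc : (decide (k1 a < k1 x) || !decide (k1 x < k1 a) && decide (k2 a < k2 x)) = true
    · rw [if_pos hc]
      simp only [Bool.or_eq_true, Bool.and_eq_true, Bool.not_eq_true', decide_eq_true_eq,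
        decide_eq_false_iff_not] at hc
      refine ih x ?_ hall'
      by_cases hxm : x = m
      · exact Or.inl hxm
      · have hxlt : pvLt k1 k2 x m := (hall x List.mem_cons_self).resolve_left hxm
        rcases ha with rfl | ⟨halt, hmem⟩
        · exfalso
          rcases hxlt with h | ⟨h1, h2⟩ <;> rcases hc with h' | ⟨h1', h2'⟩ <;> omega
        · rcases List.mem_cons.mp hmem with rfl | hmt'
          · exact absurd rfl hxm
          · exact Or.inr ⟨hxlt, hmt'⟩
    · rw [if_neg hc]
      simp only [Bool.or_eq_true, Bool.and_eq_true, Bool.not_eq_true', decide_eq_true_eq,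
        decide_eq_false_iff_not] at hc
      refine ih a ?_ hall'
      rcases ha with rfl | ⟨halt, hmem⟩
      · exact Or.inl rfl
      · rcases List.mem_cons.mp hmem with rfl | hmt'
        · exfalso
          rcases halt with h | ⟨h1, h2⟩ <;> omega
        · exact Or.inr ⟨halt, hmt'⟩

-- max(xs, key=...) returns the unique element strictly dominating all others
lemma pv_max2_eq {α : Type} (k1 k2 : α → Int) (xs : List α) (m : α) (hm : m ∈ xs)
    (h : ∀ y ∈ xs, y = m ∨ pvLt k1 k2 y m) :
    PySem.List.max2? xs k1 k2 = some m := by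
  cases xs with
  | nil => simp at hm
  | cons x t =>
    show List.foldl _ none (x :: t) = some m
    rw [List.foldl_cons]
    have ht : ∀ y ∈ t, y = m ∨ pvLt k1 k2 y m := fun y hy => h y (List.mem_cons_of_mem _ hy)
    refine pv_max2_go k1 k2 m t x ?_ ht
    rcases h x List.mem_cons_self with rfl | hxlt
    · exact Or.inl rfl
    · rcases List.mem_cons.mp hm with rfl | hmt
      · exact Or.inl rfl
      · exact Or.inr ⟨hxlt, hmt⟩

-- characterisation of the reference running-best fold
lemma pv_bfold (names : List String) :
    ∀ (bs : List (String × List String)) (b0 : Option String) (s0 : Int),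
      ((∀ bk ∈ bs, (pvScN names bk : Int) ≤ s0) ∧
        bs.foldl
            (fun (acc : Option String × Int) bk =>
              if acc.2 < (pvScN names bk : Int) then (some bk.1, (pvScN names bk : Int)) else acc)
            (b0, s0) = (b0, s0))
      ∨ (∃ l1 bk l2, bs = l1 ++ bk :: l2 ∧ s0 < (pvScN names bk : Int) ∧
          (∀ bk' ∈ l1, pvScN names bk' < pvScN names bk) ∧
          (∀ bk' ∈ l2, pvScN names bk' ≤ pvScN names bk) ∧
          bs.foldl
              (fun (acc : Option String × Int) bk =>
                if acc.2 < (pvScN names bk : Int) then (some bk.1, (pvScN names bk : Int)) else acc)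
              (b0, s0) = (some bk.1, (pvScN names bk : Int))) := by
  intro bs
  induction bs with
  | nil => intro b0 s0; exact Or.inl ⟨by simp, rfl⟩
  | cons x t ih =>
    intro b0 s0
    rw [List.foldl_cons]
    by_cases hc : s0 < (pvScN names x : Int)
    · rw [if_pos hc]
      rcases ih (some x.1) (pvScN names x : Int) with ⟨hall, hfix⟩ | ⟨l1, bk, l2, hsplit, hgt, hl1, hl2, hfold⟩
      · exact Or.inr ⟨[], x, t, rfl, hc, by simp, fun bk' h => by exact_mod_cast hall bk' h, hfix⟩
      · refine Or.inr ⟨x :: l1, bk, l2, by rw [hsplit, List.cons_append], lt_trans hc hgt, ?_, hl2, hfold⟩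
        intro bk' h
        rcases List.mem_cons.mp h with rfl | h'
        · exact_mod_cast hgt
        · exact hl1 bk' h'
    · rw [if_neg hc]
      rcases ih b0 s0 with ⟨hall, hfix⟩ | ⟨l1, bk, l2, hsplit, hgt, hl1, hl2, hfold⟩
      · refine Or.inl ⟨?_, hfix⟩
        intro bk' h
        rcases List.mem_cons.mp h with rfl | h'
        · omega
        · exact hall bk' h'
      · refine Or.inr ⟨x :: l1, bk, l2, by rw [hsplit, List.cons_append], hgt, ?_, hl2, hfold⟩
        intro bk' h
        rcases List.mem_cons.mp h with rfl | h'
        · have : (pvScN names bk' : Int) ≤ s0 := not_lt.mp hc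
          omega
        · exact hl1 bk' h'

-- A (on a non-empty input) returns exactly the reference running best
lemma pvA_eq_pvBest (names : List String) (hnil : names ≠ []) :
    infer_material_bucket_py names = pvBest names := by
  unfold infer_material_bucket_py pvBest
  rw [if_neg hnil]
  simp only [pv_scores_eq]
  rcases pv_bfold names pvBuckets none 0 with ⟨hall, hfix⟩ | ⟨l1, bk, l2, hsplit, hgt, hl1, hl2, hfold⟩
  · rw [hfix]
    have hLnil : pvL names = [] := by
      rw [List.eq_nil_iff_forall_not_mem]
      intro b hb
      rcases pv_mem_L hb with ⟨bk, hbk, rfl⟩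
      have hpos : 0 < (pvL names).count bk.1 := List.count_pos_iff.mpr hb
      rw [pv_count_L bk hbk] at hpos
      have := hall bk hbk
      omega
    rw [hLnil]
    rw [if_pos (by decide)]
  · rw [hfold]
    have hbkmem : bk ∈ pvBuckets := by
      rw [hsplit]; exact List.mem_append_right _ List.mem_cons_self
    have hpos : 0 < pvScN names bk := by exact_mod_cast hgt
    have hcnt : (pvL names).count bk.1 = pvScN names bk := pv_count_L bk hbkmem names
    have hmemL : bk.1 ∈ pvL names := List.count_pos_iff.mp (by omega)
    have hmemS : bk.1 ∈ PySem.Set.ofList (pvL names) := (PySem.Set.mem_ofList _ _).mpr hmemL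
    have hord : ∀ bk' ∈ l2, pvOrderOf bk.1 < pvOrderOf bk'.1 := by
      have hp := pvBuckets_ord_pairwise
      rw [hsplit] at hp
      exact fun bk' h => (List.pairwise_cons.mp (List.pairwise_append.mp hp).2.1).1 bk' h
    have hitems : (PySem.Dict.counter (pvL names)).items
        = (PySem.Set.ofList (pvL names)).map (fun k => (k, ((pvL names).count k : Int))) :=
      PySem.Dict.items_counter (pvL names)
    have hne : (PySem.Dict.counter (pvL names)).items ≠ [] := by
      rw [hitems]
      exact List.ne_nil_of_mem (List.mem_map.mpr ⟨bk.1, hmemS, rfl⟩)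
    rw [if_neg hne]
    have hmax : PySem.List.max2? (PySem.Dict.counter (pvL names)).items
        (fun it => it.2) (fun it => -(pvOrderOf it.1))
        = some (bk.1, (pvScN names bk : Int)) := by
      apply pv_max2_eq
      · rw [hitems]
        exact List.mem_map.mpr ⟨bk.1, hmemS, by rw [hcnt]⟩
      · intro y hy
        rw [hitems] at hy
        rcases List.mem_map.mp hy with ⟨b', hb'S, rfl⟩
        have hb'L : b' ∈ pvL names := (PySem.Set.mem_ofList _ _).mp hb'S
        rcases pv_mem_L hb'L with ⟨bk', hbk', rfl⟩
        have hcnt' : (pvL names).count bk'.1 = pvScN names bk' := pv_count_L bk' hbk' names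
        by_cases hsame : bk'.1 = bk.1
        · left
          rw [hsame, hcnt]
        · right
          have hbkne : bk' ≠ bk := fun h => hsame (by rw [h])
          rw [hsplit] at hbk'
          rcases List.mem_append.mp hbk' with h1 | h2
          · left
            have := hl1 bk' h1
            simp only [hcnt']
            exact_mod_cast this
          · rcases List.mem_cons.mp h2 with h | h2'
            · exact absurd h hbkne
            · have hle := hl2 bk' h2'
              rcases Nat.lt_or_ge (pvScN names bk') (pvScN names bk) with hlt | hge
              · left
                simp only [hcnt']
                exact_mod_cast hlt
              · right
                have heq : pvScN names bk' = pvScN names bk := by omega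
                constructor
                · simp only [hcnt', heq]
                · have := hord bk' h2'
                  simp only []
                  omega
    rw [hmax]
    rfl

-- ----- B side -----

-- indices of the buckets hit by one name, and the whole hit-index multiset
def pvHitsOf (n : String) : List Int :=
  ((PySem.List.enumerate pvBuckets).filter (fun p => pvHit (PySem.Str.lower n) p.2)).map Prod.fst

def pvHits (names : List String) : List Int := names.flatMap pvHitsOf

lemma pv_hits_eq (names : List String) :
    names.foldl
        (fun hits name =>
          let low := PySem.Str.lower name
          (PySem.List.enumerate pvBuckets).foldl
            (fun hits p => if pvHit low p.2 then hits ++ [p.1] else hits) hits)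
        []
      = pvHits names := by
  show names.foldl
      (fun hits name =>
        (PySem.List.enumerate pvBuckets).foldl
          (fun hits p => if pvHit (PySem.Str.lower name) p.2 then hits ++ [p.1] else hits) hits)
      [] = pvHits names
  rw [pvHits, ← List.nil_append (names.flatMap pvHitsOf),
    ← PySem.List.foldl_append_eq_flatMap]
  exact PySem.List.foldl_congr_mem names _ _ []
    (by intro acc x _; exact PySem.List.foldl_append_if _ _ _ _)

lemma pv_enum_fst_nodup : ((PySem.List.enumerate pvBuckets).map Prod.fst).Nodup := by decide

-- count of index e.1 among the hits = the score of bucket e.2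
lemma pv_count_hits (e : Int × (String × List String)) (he : e ∈ PySem.List.enumerate pvBuckets)
    (names : List String) : (pvHits names).count e.1 = pvScN names e.2 := by
  induction names with
  | nil => rfl
  | cons n ns ih =>
    have hstep := pv_count_map_fst_filter (fun p => pvHit (PySem.Str.lower n) p.2)
      (PySem.List.enumerate pvBuckets) e he pv_enum_fst_nodup
    by_cases hp : pvHit (PySem.Str.lower n) e.2 = true
    · simp only [pvHits, List.flatMap_cons, List.count_append] at *
      rw [show (pvHitsOf n).count e.1 = 1 by simpa [pvHitsOf, hp] using hstep, ih]
      simp [pvScN, hp, Nat.add_comm]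
    · simp only [pvHits, List.flatMap_cons, List.count_append] at *
      rw [show (pvHitsOf n).count e.1 = 0 by simpa [pvHitsOf, hp] using hstep, ih]
      simp [pvScN, hp]

lemma pv_mem_hits {x : Int} {names : List String} (h : x ∈ pvHits names) :
    x ∈ ([0, 1, 2, 3, 4, 5] : List Int) := by
  rcases List.mem_flatMap.mp h with ⟨n, _, hx⟩
  rcases List.mem_map.mp hx with ⟨p, hp, hfst⟩
  have hmem : p ∈ PySem.List.enumerate pvBuckets := List.mem_of_mem_filter hp
  have : p.1 ∈ (PySem.List.enumerate pvBuckets).map Prod.fst := List.mem_map.mpr ⟨p, hmem, rfl⟩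
  rw [show (PySem.List.enumerate pvBuckets).map Prod.fst = ([0, 1, 2, 3, 4, 5] : List Int) by decide] at this
  rwa [hfst] at this

-- the sorted hit list is the concatenation of one constant run per bucket index
def pvFl (c : Int → Nat) (vs : List Int) : List Int :=
  vs.flatMap (fun v => List.replicate (c v) v)

lemma pv_mem_fl {c : Int → Nat} {vs : List Int} {x : Int} (h : x ∈ pvFl c vs) : x ∈ vs := by
  rcases List.mem_flatMap.mp h with ⟨v, hv, hx⟩
  rwa [List.eq_of_mem_replicate hx]

lemma pv_fl_pairwise (c : Int → Nat) :
    ∀ (vs : List Int), vs.Pairwise (· < ·) → (pvFl c vs).Pairwise (· ≤ ·) := by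
  intro vs
  induction vs with
  | nil => intro _; simp [pvFl]
  | cons v t ih =>
    intro hp
    rcases List.pairwise_cons.mp hp with ⟨hv, ht⟩
    have hrec := ih ht
    simp only [pvFl, List.flatMap_cons]
    apply List.pairwise_append.mpr
    refine ⟨List.pairwise_replicate.mpr (Or.inr le_rfl), hrec, ?_⟩
    intro a ha b hb
    rw [List.eq_of_mem_replicate ha]
    exact le_of_lt (hv b (pv_mem_fl hb))

lemma pv_fl_count (c : Int → Nat) :
    ∀ (vs : List Int), vs.Nodup → ∀ x : Int, (pvFl c vs).count x = if x ∈ vs then c x else 0 := by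
  intro vs
  induction vs with
  | nil => intro _ x; simp [pvFl]
  | cons v t ih =>
    intro hnd x
    rcases List.nodup_cons.mp hnd with ⟨hv, ht⟩
    simp only [pvFl, List.flatMap_cons, List.count_append] at *
    rw [List.count_replicate, ih ht x]
    by_cases hx : x = v
    · subst hx
      simp [hv]
    · simp [hx, Ne.symm hx]

lemma pv_sorted_hits (names : List String) :
    PySem.List.sorted (pvHits names) (fun x => x) false
      = pvFl (fun v => (pvHits names).count v) ([0, 1, 2, 3, 4, 5] : List Int) := by
  apply PySem.List.sorted_id_eq_of_perm_of_pairwise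
  · rw [List.perm_iff_count]
    intro x
    rw [pv_fl_count _ _ (by decide)]
    by_cases hx : x ∈ ([0, 1, 2, 3, 4, 5] : List Int)
    · simp [hx]
    · rw [if_neg hx, eq_comm, List.count_eq_zero]
      intro hmem
      exact hx (pv_mem_hits hmem)
  · exact pv_fl_pairwise _ _ (by decide)

-- scanning one constant run from a state already inside a run of the same value
lemma pv_run_replicate (v : Int) :
    ∀ (k : Nat) (b : Option Int) (br cr : Int), cr ≤ br →
      (List.replicate k v).foldl pvRunStep (b, br, some v, cr)
        = ((if br < cr + (k : Int) then some v else b), max br (cr + (k : Int)), some v, cr + (k : Int)) := by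
  intro k
  induction k with
  | zero =>
    intro b br cr hle
    rw [List.replicate_zero, List.foldl_nil]
    simp only [Prod.mk.injEq]
    push_cast
    refine ⟨?_, by omega, by trivial, by omega⟩
    rw [if_neg (by omega)]
  | succ k ih =>
    intro b br cr hle
    rw [List.replicate_succ, List.foldl_cons]
    have hstep : pvRunStep (b, br, some v, cr) v
        = if br < cr + 1 then (some v, cr + 1, some v, cr + 1) else (b, br, some v, cr + 1) := by
      simp only [pvRunStep]
      rfl
    rw [hstep]
    by_cases hc : br < cr + 1
    · rw [if_pos hc, ih (some v) (cr + 1) (cr + 1) le_rfl]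
      simp only [Prod.mk.injEq]
      push_cast
      refine ⟨?_, by omega, by trivial, by omega⟩
      split_ifs <;> first | rfl | omega
    · rw [if_neg hc, ih b br (cr + 1) (by omega)]
      simp only [Prod.mk.injEq]
      push_cast
      refine ⟨?_, by omega, by trivial, by omega⟩
      split_ifs <;> first | rfl | omega

-- the full scan over the run decomposition equals a per-value running best
lemma pv_run_fl (c : Int → Nat) :
    ∀ (vs : List Int) (b : Option Int) (br : Int) (ci : Option Int) (cr : Int),
      vs.Pairwise (· < ·) → 0 ≤ br → (∀ v ∈ vs, ci ≠ some v) →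
      ((pvFl c vs).foldl pvRunStep (b, br, ci, cr)).1
        = (vs.foldl
            (fun (p : Option Int × Int) v =>
              if p.2 < (c v : Int) then (some v, (c v : Int)) else p)
            (b, br)).1 := by
  intro vs
  induction vs with
  | nil => intro b br ci cr _ _ _; rfl
  | cons v t ih =>
    intro b br ci cr hp hbr hci
    rcases List.pairwise_cons.mp hp with ⟨hv, ht⟩
    have hci' : ∀ v' ∈ t, ci ≠ some v' := fun v' h => hci v' (List.mem_cons_of_mem _ h)
    rw [show pvFl c (v :: t) = List.replicate (c v) v ++ pvFl c t from rfl,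
      List.foldl_append, List.foldl_cons]
    rcases Nat.eq_zero_or_pos (c v) with h0 | hpos
    · rw [h0, List.replicate_zero, List.foldl_nil, if_neg (by push_cast; omega)]
      exact ih b br ci cr ht hbr hci'
    · obtain ⟨k, hk⟩ : ∃ k, c v = k + 1 := ⟨c v - 1, by omega⟩
      rw [hk, List.replicate_succ, List.foldl_cons]
      have hstep : pvRunStep (b, br, ci, cr) v
          = if br < 1 then (some v, 1, some v, 1) else (b, br, some v, 1) := by
        simp only [pvRunStep, if_neg (hci v List.mem_cons_self)]
      rw [hstep]
      have hnext : ∀ v' ∈ t, (some v : Option Int) ≠ some v' := by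
        intro v' h hc
        have := hv v' h
        simp only [Option.some.injEq] at hc
        omega
      by_cases hc : br < 1
      · rw [if_pos hc, pv_run_replicate v k (some v) 1 1 le_rfl, ite_self,
          show max (1 : Int) (1 + (k : Int)) = ((k + 1 : Nat) : Int) by push_cast; omega,
          show (1 : Int) + (k : Int) = ((k + 1 : Nat) : Int) by push_cast; omega,
          if_pos (show br < ((k + 1 : Nat) : Int) by push_cast; omega)]
        exact ih (some v) _ (some v) _ ht (by push_cast; omega) hnext
      · rw [if_neg hc, pv_run_replicate v k b br 1 (by omega)]
        by_cases hlt : br < 1 + (k : Int)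
        · rw [if_pos hlt, max_eq_right (by omega),
            show (1 : Int) + (k : Int) = ((k + 1 : Nat) : Int) by push_cast; omega,
            if_pos (show br < ((k + 1 : Nat) : Int) by push_cast; omega)]
          exact ih (some v) _ (some v) _ ht (by push_cast; omega) hnext
        · rw [if_neg hlt, max_eq_left (by omega),
            if_neg (show ¬ br < ((k + 1 : Nat) : Int) by push_cast; omega)]
          exact ih b br (some v) _ ht hbr hnext

-- the index-level running best, mapped to bucket names, is the reference running best
lemma pv_bridge (names : List String) :
    (match (([0, 1, 2, 3, 4, 5] : List Int).foldl
        (fun (p : Option Int × Int) v =>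
          if p.2 < ((pvHits names).count v : Int) then (some v, ((pvHits names).count v : Int)) else p)
        (none, 0)).1 with
      | none => (none : Option String)
      | some best_idx =>
        match PySem.List.pyGet? pvBuckets best_idx with
        | some bk => some bk.1
        | none => none)
      = pvBest names := by
  have h0 : (pvHits names).count 0 = pvScN names ("wood", ["wood", "timber", "lumber", "hout", "hardhout", "multiplex", "plywood", "oak", "pine", "spruce"]) :=
    pv_count_hits (0, _) (by decide) names
  have h1 : (pvHits names).count 1 = pvScN names ("metal", ["steel", "staal", "metal", "aluminium", "aluminum", "copper", "zinc", "iron", "bronze"]) :=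
    pv_count_hits (1, _) (by decide) names
  have h2 : (pvHits names).count 2 = pvScN names ("concrete", ["concrete", "beton", "cement"]) :=
    pv_count_hits (2, _) (by decide) names
  have h3 : (pvHits names).count 3 = pvScN names ("masonry", ["masonry", "brick", "baksteen", "stone", "granite", "natuursteen", "kalkzandsteen"]) :=
    pv_count_hits (3, _) (by decide) names
  have h4 : (pvHits names).count 4 = pvScN names ("glass", ["glass", "glas", "glazing"]) :=
    pv_count_hits (4, _) (by decide) names
  have h5 : (pvHits names).count 5 = pvScN names ("soil", ["soil", "earth", "dirt", "gravel", "sand", "asphalt", "bulk-material", "fill"]) :=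
    pv_count_hits (5, _) (by decide) names
  unfold pvBest
  simp only [pvBuckets, List.foldl_cons, List.foldl_nil, h0, h1, h2, h3, h4, h5]
  generalize (pvScN names ("wood", ["wood", "timber", "lumber", "hout", "hardhout", "multiplex", "plywood", "oak", "pine", "spruce"]) : Int) = t0
  generalize (pvScN names ("metal", ["steel", "staal", "metal", "aluminium", "aluminum", "copper", "zinc", "iron", "bronze"]) : Int) = t1
  generalize (pvScN names ("concrete", ["concrete", "beton", "cement"]) : Int) = t2
  generalize (pvScN names ("masonry", ["masonry", "brick", "baksteen", "stone", "granite", "natuursteen", "kalkzandsteen"]) : Int) = t3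
  generalize (pvScN names ("glass", ["glass", "glas", "glazing"]) : Int) = t4
  generalize (pvScN names ("soil", ["soil", "earth", "dirt", "gravel", "sand", "asphalt", "bulk-material", "fill"]) : Int) = t5
  split_ifs <;> rfl

-- ===== VERDICT (by name: the statement is the Claim_ definition above) =====
theorem infer_material_bucket_py_spec : Claim_equal_infer_material_bucket_py := by
  intro names _
  unfold Spec_infer_material_bucket_py
  by_cases hnil : names = []
  · subst hnil; rfl
  · rw [pvA_eq_pvBest names hnil]
    unfold infer_material_bucket_py_alt
    rw [if_neg hnil]
    simp only [pv_hits_eq, pv_sorted_hits]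
    rw [eq_comm]
    have hfold := pv_run_fl (fun v => (pvHits names).count v) ([0, 1, 2, 3, 4, 5] : List Int)
      none 0 none 0 (by decide) le_rfl (by intro v _ h; cases h)
    rw [hfold]
    beta_reduce
    exact pv_bridge names
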